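-- pv_equiv track=rewrite | github.com/AlgorithmBreakClub/EveryWeekAlgorithm | #89_11월_5주/gaeng2y/더 맵게/solution.py | solution
-- ===== SOURCE A (Python) =====
-- import heapq
--
-- def solution(scoville, K):
--     answer = 0
--     heapq.heapify(scoville)
--     while True:
--         mf = heapq.heappop(scoville)
--         if mf >= K:
--             break
--         elif len(scoville) == 0:
--             answer = -1
--             break
--         ms = heapq.heappop(scoville)
--         tmp = mf + 2*ms
--         heapq.heappush(scoville, tmp)
--         answer += 1
--     return answer
-- ===== SOURCE B (Python) =====
-- def solution(scoville, K):
--     answer = 0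
--     while scoville:
--         mf = min(scoville)
--         scoville.remove(mf)
--         if mf >= K:
--             return answer
--         if not scoville:
--             return -1
--         ms = min(scoville)
--         scoville.remove(ms)
--         scoville.append(mf + 2 * ms)
--         answer += 1
--     return answer
-- ===== Notes on version B (the rewrite author's own statement) =====
-- stated objective: simpler
-- what changed: Replaces the heapq binary min-heap with plain in-place linear min-scans (find-and-remove the minimum, twice per mixing round) driven by an early-return while loop.
import Mathlib
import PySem

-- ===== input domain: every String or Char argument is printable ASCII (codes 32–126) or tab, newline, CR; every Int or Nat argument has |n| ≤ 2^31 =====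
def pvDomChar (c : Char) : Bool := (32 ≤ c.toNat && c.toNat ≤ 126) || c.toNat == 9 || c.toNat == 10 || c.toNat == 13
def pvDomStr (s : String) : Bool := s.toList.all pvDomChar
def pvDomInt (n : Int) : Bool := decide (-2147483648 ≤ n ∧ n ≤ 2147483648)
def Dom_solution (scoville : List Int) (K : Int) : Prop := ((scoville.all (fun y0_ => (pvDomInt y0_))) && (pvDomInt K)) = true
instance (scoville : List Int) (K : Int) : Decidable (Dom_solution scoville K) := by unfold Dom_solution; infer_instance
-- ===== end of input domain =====

-- B replaces the heapq binary min-heap by plain linear min-scans (simpler, no heap invariant);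
-- A mutates its argument in place (heapify/heappop), so the equivalence claimed here is about the RETURN value only.

-- ===== PORT A =====
-- heapq is not in PySem, so CPython's array-based binary min-heap is ported by hand
-- (siftDown/siftUp over list indices); exact on return values of heappop.

def hget (l : List Int) (i : Nat) : Int := l.getD i 0

def hswap (l : List Int) (i j : Nat) : List Int := (l.set i (hget l j)).set j (hget l i)

theorem length_hswap (l : List Int) (i j : Nat) : (hswap l i j).length = l.length := by
  simp [hswap]

theorem siftDown_dec1 (l : List Int) (i : Nat) (h : 2*i+1 < l.length) :
    (hswap l i (2*i+1)).length - (2*i+1) < l.length - i := by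
  simp only [length_hswap]; omega

theorem siftDown_dec2 (l : List Int) (i : Nat) (h : 2*i+2 < l.length) :
    (hswap l i (2*i+2)).length - (2*i+2) < l.length - i := by
  simp only [length_hswap]; omega

def siftDown (l : List Int) (i : Nat) : List Int :=
  if h1 : 2*i+1 < l.length then
    if h2 : 2*i+2 < l.length ∧ hget l (2*i+2) < hget l (2*i+1) then
      if hget l (2*i+2) < hget l i then siftDown (hswap l i (2*i+2)) (2*i+2) else l
    else
      if hget l (2*i+1) < hget l i then siftDown (hswap l i (2*i+1)) (2*i+1) else l
  else l
termination_by l.length - i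
decreasing_by
  · exact siftDown_dec2 l i h2.1
  · exact siftDown_dec1 l i h1

theorem siftUp_dec (i : Nat) (h : 0 < i) : (i-1)/2 < i := by omega

def siftUp (l : List Int) (i : Nat) : List Int :=
  if h : 0 < i then
    if hget l i < hget l ((i-1)/2) then siftUp (hswap l ((i-1)/2) i) ((i-1)/2) else l
  else l
termination_by i
decreasing_by exact siftUp_dec i h

-- heapify: for i in reversed(range(n//2)): _siftup(x, i)
def heapify (l : List Int) : List Int :=
  ((List.range (l.length / 2)).reverse).foldl siftDown l

-- heappush: append, then sift up from the last position
def heappush (l : List Int) (x : Int) : List Int :=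
  siftUp (l ++ [x]) l.length

-- heappop: lastelt = heap.pop(); if heap: item = heap[0]; heap[0] = lastelt; _siftup(heap, 0); return item
-- (on an empty list Python raises IndexError: excluded by Pre_; the [] branch here is dead code)
def heappop (l : List Int) : Int × List Int :=
  if l.length ≤ 1 then (hget l 0, [])
  else (hget l 0, siftDown ((l.dropLast).set 0 (hget l (l.length - 1))) 0)

theorem length_siftDown (l : List Int) (i : Nat) : (siftDown l i).length = l.length := by
  fun_induction siftDown <;> simp_all [length_hswap]

theorem length_siftUp (l : List Int) (i : Nat) : (siftUp l i).length = l.length := by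
  fun_induction siftUp <;> simp_all [length_hswap]

theorem pop_len (l : List Int) : (heappop l).2.length = l.length - 1 := by
  unfold heappop
  split
  · simp; omega
  · simp [length_siftDown]

theorem push_len (l : List Int) (x : Int) : (heappush l x).length = l.length + 1 := by
  simp [heappush, length_siftUp]

theorem loopA_dec (heap : List Int) (x : Int) (hne : heap ≠ [])
    (hr : ¬ (heappop heap).2.length = 0) :
    (heappush (heappop (heappop heap).2).2 x).length < heap.length := by
  have h1 := pop_len heap
  have h2 := pop_len (heappop heap).2
  have h3 : heap.length ≠ 0 := fun h0 => hne (List.length_eq_zero_iff.mp h0)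
  rw [push_len]
  omega

-- the mixing loop of A, over the heap
def loopA (heap : List Int) (K : Int) (answer : Int) : Int :=
  if hne : heap = [] then answer   -- unreachable under Pre_: heappop of [] raises IndexError
  else
    let mf := (heappop heap).1
    let r := (heappop heap).2
    if K ≤ mf then answer
    else if hr : r.length = 0 then (-1)
    else
      let ms := (heappop r).1
      let r2 := (heappop r).2
      loopA (heappush r2 (mf + 2*ms)) K (answer + 1)
termination_by heap.length
decreasing_by exact loopA_dec heap _ hne hr

def solution (scoville : List Int) (K : Int) : Int :=
  loopA (heapify scoville) K 0

-- ===== PORT B =====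
-- B-side helper: mirrors B's statement pair "m = min(xs); xs.remove(m)"
def popMin (l : List Int) : Int × List Int :=
  ((PySem.List.min? l (fun x => x)).getD 0,
   (PySem.List.remove? l ((PySem.List.min? l (fun x => x)).getD 0)).getD [])

-- termination helper for loopB: removing the minimum shortens the list by one
theorem popMin_min (l : List Int) (h : l ≠ []) :
    PySem.List.min? l (fun x => x) = some (popMin l).1 := by
  cases e : PySem.List.min? l (fun x => x) with
  | none => exact absurd ((PySem.List.min?_eq_none_iff l _).mp e) h
  | some m => simp [popMin, e]

theorem popMin_snd (l : List Int) (h : l ≠ []) : (popMin l).2 = l.erase (popMin l).1 := by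
  have hm := popMin_min l h
  have hmem : (popMin l).1 ∈ l := PySem.List.min?_mem hm
  simp only [popMin] at *
  rw [PySem.List.remove?_eq_some_erase l _ hmem]
  rfl

theorem popMin_len (l : List Int) (h : l ≠ []) : (popMin l).2.length + 1 = l.length := by
  rw [popMin_snd l h,
    List.length_erase_of_mem (PySem.List.min?_mem (popMin_min l h))]
  have := List.length_pos_of_ne_nil h
  omega

theorem loopB_dec (l : List Int) (x : Int) (hne : l ≠ []) (hr : ¬ (popMin l).2 = []) :
    ((popMin (popMin l).2).2 ++ [x]).length < l.length := by
  have h1 := popMin_len l hne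
  have h2 := popMin_len (popMin l).2 hr
  simp only [List.length_append, List.length_cons, List.length_nil]
  omega

def loopB (l : List Int) (K : Int) (answer : Int) : Int :=
  if hne : l = [] then answer
  else
    if K ≤ (popMin l).1 then answer
    else if hr : (popMin l).2 = [] then (-1)
    else
      loopB ((popMin (popMin l).2).2 ++ [(popMin l).1 + 2 * (popMin (popMin l).2).1])
        K (answer + 1)
termination_by l.length
decreasing_by exact loopB_dec l _ hne hr

def solution_alt (scoville : List Int) (K : Int) : Int :=
  loopB scoville K 0

-- ===== PRECONDITION & SPEC =====
-- Pre_ excludes only the empty list, on which A raises IndexError (heappop from an empty heap)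
def Pre_solution (scoville : List Int) (K : Int) : Prop := scoville ≠ []
instance (scoville : List Int) (K : Int) : Decidable (Pre_solution scoville K) := by unfold Pre_solution; infer_instance
def pvWitness_solution : List Int × Int := ([1, 2, 3, 9, 10, 12], 7)

def Spec_solution (scoville : List Int) (K : Int) (out : Int) : Prop := out = solution_alt scoville K
instance (scoville : List Int) (K : Int) (out : Int) : Decidable (Spec_solution scoville K out) := by unfold Spec_solution; infer_instance

-- ===== CLAIM (what is proved, stated in full; the proofs are below) =====
def Claim_equal_solution : Prop := ∀ (scoville : List Int) (K : Int), Dom_solution scoville K → Pre_solution scoville K → Spec_solution scoville K (solution scoville K)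


-- ===== LEMMAS AND PROOFS =====

-- multiset view of a list
def M (l : List Int) : Multiset Int := (l : Multiset Int)

-- heap order: every parent/child edge whose parent index is ≥ k holds
def IsHeapFrom (l : List Int) (k : Nat) : Prop :=
  ∀ j, 0 < j → j < l.length → k ≤ (j-1)/2 → hget l ((j-1)/2) ≤ hget l j

def IsHeap (l : List Int) : Prop := IsHeapFrom l 0

-- ---- hget / hswap kit ----
theorem hget_eq_getElem (l : List Int) (i : Nat) (h : i < l.length) : hget l i = l[i] := by
  simp [hget, List.getD_eq_getElem?_getD, List.getElem?_eq_getElem h]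

theorem hget_mem (l : List Int) (i : Nat) (h : i < l.length) : hget l i ∈ l := by
  rw [hget_eq_getElem l i h]; exact List.getElem_mem h

theorem hget_set_eq (l : List Int) (i : Nat) (a : Int) (h : i < l.length) :
    hget (l.set i a) i = a := by
  simp [hget, List.getD_eq_getElem?_getD, List.getElem?_set_self h]

theorem hget_set_ne (l : List Int) (i j : Nat) (a : Int) (h : i ≠ j) :
    hget (l.set i a) j = hget l j := by
  simp [hget, List.getD_eq_getElem?_getD, List.getElem?_set_ne h]

theorem hget_hswap_fst (l : List Int) (i j : Nat) (hij : i ≠ j) (hi : i < l.length) :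
    hget (hswap l i j) i = hget l j := by
  rw [hswap, hget_set_ne _ j i _ (Ne.symm hij), hget_set_eq _ _ _ hi]

theorem hget_hswap_snd (l : List Int) (i j : Nat) (hj : j < l.length) :
    hget (hswap l i j) j = hget l i := by
  rw [hswap, hget_set_eq]; simpa using hj

theorem hget_hswap_other (l : List Int) (i j t : Nat) (h1 : t ≠ i) (h2 : t ≠ j) :
    hget (hswap l i j) t = hget l t := by
  rw [hswap, hget_set_ne _ _ _ _ (Ne.symm h2), hget_set_ne _ _ _ _ (Ne.symm h1)]

theorem hswap_mset (l : List Int) (i j : Nat) (hij : i ≠ j) (hi : i < l.length)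
    (hj : j < l.length) : M (hswap l i j) = M l := by
  have hj' : j < (l.set i (hget l j)).length := by simpa using hj
  have e1 : M (l.set i (hget l j)) = hget l j ::ₘ M (l.eraseIdx i) := by
    rw [M, M, Multiset.cons_coe, Multiset.coe_eq_coe]
    exact List.set_perm_cons_eraseIdx hi _
  have e0 : M l = hget l i ::ₘ M (l.eraseIdx i) := by
    rw [M, M, Multiset.cons_coe, Multiset.coe_eq_coe, hget_eq_getElem l i hi]
    exact (List.getElem_cons_eraseIdx_perm hi).symm
  have e2 : M (hswap l i j) = hget l i ::ₘ M ((l.set i (hget l j)).eraseIdx j) := by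
    rw [hswap, M, M, Multiset.cons_coe, Multiset.coe_eq_coe]
    exact List.set_perm_cons_eraseIdx hj' _
  have e3 : M (l.set i (hget l j)) = hget l j ::ₘ M ((l.set i (hget l j)).eraseIdx j) := by
    have hgj : (l.set i (hget l j))[j]'hj' = hget l j := by
      rw [← hget_eq_getElem _ j hj']
      exact hget_set_ne l i j _ hij
    have hp := Multiset.coe_eq_coe.mpr (List.getElem_cons_eraseIdx_perm hj').symm
    rw [← Multiset.cons_coe] at hp
    rw [M, M, hp, hgj]
  rw [e2, ← (Multiset.cons_inj_right _).mp (e1.symm.trans e3), e0]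

-- ---- siftDown ----
theorem siftDown_mset (l : List Int) (i : Nat) : M (siftDown l i) = M l := by
  fun_induction siftDown with
  | case1 l i h1 h2 hlt ih =>
    rw [ih, hswap_mset l i (2*i+2) (by omega) (by omega) (by omega)]
  | case3 l i h1 h2 hlt ih =>
    rw [ih, hswap_mset l i (2*i+1) (by omega) (by omega) (by omega)]
  | case2 => rfl
  | case4 => rfl
  | case5 => rfl

-- the invariant step: after swapping the root i with its smaller child c, the
-- siftDown preconditions hold at c
theorem siftDown_step (l : List Int) (i c k : Nat)
    (hcc : c = 2*i+1 ∨ c = 2*i+2) (hc : c < l.length)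
    (hmin : ∀ j, (j = 2*i+1 ∨ j = 2*i+2) → j < l.length → hget l c ≤ hget l j)
    (hlt : hget l c < hget l i)
    (h1 : ∀ j, 0 < j → j < l.length → k ≤ (j-1)/2 → (j-1)/2 ≠ i → hget l ((j-1)/2) ≤ hget l j)
    (h2 : ∀ j, 0 < j → j < l.length → (j-1)/2 = i → 0 < i → k ≤ (i-1)/2 → hget l ((i-1)/2) ≤ hget l j) :
    (∀ j, 0 < j → j < (hswap l i c).length → k ≤ (j-1)/2 → (j-1)/2 ≠ c →
        hget (hswap l i c) ((j-1)/2) ≤ hget (hswap l i c) j) ∧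
    (∀ j, 0 < j → j < (hswap l i c).length → (j-1)/2 = c → 0 < c → k ≤ (c-1)/2 →
        hget (hswap l i c) ((c-1)/2) ≤ hget (hswap l i c) j) := by
  have hic : i ≠ c := by omega
  have hi : i < l.length := by omega
  have wi : hget (hswap l i c) i = hget l c := hget_hswap_fst l i c hic hi
  have wc : hget (hswap l i c) c = hget l i := hget_hswap_snd l i c hc
  have wo : ∀ t, t ≠ i → t ≠ c → hget (hswap l i c) t = hget l t :=
    fun t a b => hget_hswap_other l i c t a b
  rw [length_hswap]
  constructor
  · intro j hj0 hjn hk hpc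
    by_cases hpi : (j-1)/2 = i
    · -- parent is i: j is a child of i
      rw [hpi, wi]
      by_cases hjc : j = c
      · rw [hjc, wc]; exact le_of_lt hlt
      · rw [wo j (by omega) hjc]
        exact hmin j (by omega) hjn
    · rw [wo ((j-1)/2) hpi hpc]
      by_cases hji : j = i
      · -- edge from i's parent down to position i, which now holds hget l c
        subst hji
        rw [wi]
        exact h2 c (by omega) hc (by omega) hj0 hk
      · have hjc : j ≠ c := by omega
        rw [wo j hji hjc]
        exact h1 j hj0 hjn hk hpi
  · intro j hj0 hjn hpc hc0 hk
    have hci : (c-1)/2 = i := by omega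
    rw [hci, wi, wo j (by omega) (by omega)]
    have := h1 j hj0 hjn (by omega) (by omega)
    rw [hpc] at this
    exact this

theorem siftDown_heap (l : List Int) (i : Nat) : ∀ k,
    (∀ j, 0 < j → j < l.length → k ≤ (j-1)/2 → (j-1)/2 ≠ i → hget l ((j-1)/2) ≤ hget l j) →
    (∀ j, 0 < j → j < l.length → (j-1)/2 = i → 0 < i → k ≤ (i-1)/2 → hget l ((i-1)/2) ≤ hget l j) →
    IsHeapFrom (siftDown l i) k := by
  fun_induction siftDown with
  | case1 l i hn h2 hlt ih =>
    intro k h1' h2'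
    have := siftDown_step l i (2*i+2) k (Or.inr rfl) (by omega)
      (by intro j hj hjn
          rcases hj with rfl | rfl
          · exact le_of_lt h2.2
          · exact le_refl _)
      hlt h1' h2'
    exact ih k this.1 this.2
  | case2 l i hn h2 hlt =>
    intro k h1' h2'
    intro j hj0 hjn hk
    by_cases hpi : (j-1)/2 = i
    · have : j = 2*i+1 ∨ j = 2*i+2 := by omega
      rcases this with rfl | rfl
      · rw [hpi]
        exact le_trans (not_lt.mp hlt) (le_of_lt h2.2)
      · rw [hpi]
        exact not_lt.mp hlt
    · exact h1' j hj0 hjn hk hpi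
  | case3 l i hn h2 hlt ih =>
    intro k h1' h2'
    have := siftDown_step l i (2*i+1) k (Or.inl rfl) (by omega)
      (by intro j hj hjn
          rcases hj with rfl | rfl
          · exact le_refl _
          · exact not_lt.mp (fun hc => h2 ⟨hjn, hc⟩))
      hlt h1' h2'
    exact ih k this.1 this.2
  | case4 l i hn h2 hlt =>
    intro k h1' h2'
    intro j hj0 hjn hk
    by_cases hpi : (j-1)/2 = i
    · have : j = 2*i+1 ∨ j = 2*i+2 := by omega
      rcases this with rfl | rfl
      · rw [hpi]
        exact not_lt.mp hlt
      · rw [hpi]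
        exact le_trans (not_lt.mp hlt) (not_lt.mp (fun hc => h2 ⟨hjn, hc⟩))
    · exact h1' j hj0 hjn hk hpi
  | case5 l i hn =>
    intro k h1' h2'
    intro j hj0 hjn hk
    by_cases hpi : (j-1)/2 = i
    · omega
    · exact h1' j hj0 hjn hk hpi

-- ---- heapify ----
theorem heapify_go : ∀ (m : Nat) (l : List Int), IsHeapFrom l m →
    IsHeapFrom (((List.range m).reverse).foldl siftDown l) 0 := by
  intro m
  induction m with
  | zero => intro l h; simpa using h
  | succ m ih =>
    intro l h
    rw [List.range_succ, List.reverse_append]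
    simp only [List.reverse_cons, List.reverse_nil, List.nil_append, List.cons_append,
      List.foldl_cons]
    apply ih
    apply siftDown_heap l m m
    · intro j hj0 hjn hk hne
      exact h j hj0 hjn (by omega)
    · intro j hj0 hjn hpj hm0 hkm
      omega

theorem heapify_heap (l : List Int) : IsHeap (heapify l) := by
  apply heapify_go
  intro j hj0 hjn hk
  omega

theorem heapify_mset (l : List Int) : M (heapify l) = M l := by
  unfold heapify
  generalize (List.range (l.length / 2)).reverse = idxs
  induction idxs generalizing l with
  | nil => rfl
  | cons x t ih => rw [List.foldl_cons, ih, siftDown_mset]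

-- ---- heappop ----
theorem pop_fst (l : List Int) : (heappop l).1 = hget l 0 := by
  unfold heappop; split <;> rfl

theorem pop_mset (l : List Int) (h : l ≠ []) : M l = hget l 0 ::ₘ M (heappop l).2 := by
  obtain ⟨x, t, rfl⟩ := List.exists_cons_of_ne_nil h
  unfold heappop
  split
  · rename_i hlen
    have ht : t = [] := by simpa using hlen
    subst ht
    simp [M, hget]
  · rename_i hlen
    have ht : t ≠ [] := by intro e; subst e; simp at hlen
    have hx0 : hget (x :: t) 0 = x := by simp [hget]
    rw [hx0, siftDown_mset]
    have hdl : (x :: t).dropLast = x :: t.dropLast := by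
      rcases List.exists_cons_of_ne_nil ht with ⟨y, u, rfl⟩
      simp
    have hlast : hget (x :: t) ((x :: t).length - 1) = (x :: t).getLast (by simp) := by
      rw [List.getLast_eq_getElem, hget_eq_getElem _ _ (by simp)]
      rfl
    rw [hdl, hlast]
    have hset : (x :: t.dropLast).set 0 ((x :: t).getLast (by simp)) =
        (x :: t).getLast (by simp) :: t.dropLast := by simp
    rw [hset]
    have hgl : (x :: t).getLast (by simp) = t.getLast ht := List.getLast_cons ht
    have ht' : t.dropLast ++ [t.getLast ht] = t := List.dropLast_append_getLast ht
    calc M (x :: t) = x ::ₘ M t := by rw [M, M, Multiset.cons_coe]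
    _ = x ::ₘ M (t.dropLast ++ [t.getLast ht]) := by rw [ht']
    _ = x ::ₘ (t.getLast ht) ::ₘ M t.dropLast := by
        rw [M, M]
        congr 1
        exact Multiset.coe_eq_coe.mpr (List.perm_append_singleton _ _)
    _ = x ::ₘ M ((x :: t).getLast (by simp) :: t.dropLast) := by
        rw [hgl, M, M, Multiset.cons_coe]

theorem pop_heap (l : List Int) (h : IsHeap l) : IsHeap (heappop l).2 := by
  unfold heappop
  split
  · intro j hj0 hjn hk; simp at hjn
  · rename_i hlen
    have hn : 2 ≤ l.length := by omega
    apply siftDown_heap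
    · intro j hj0 hjn hk hne
      have hjn' : j < l.length - 1 := by
        simpa using hjn
      have hval : ∀ q, 0 < q → q < l.length - 1 →
          hget ((l.dropLast).set 0 (hget l (l.length - 1))) q = hget l q := by
        intro q hq0 hq
        rw [hget_set_ne _ _ _ _ (by omega)]
        simp only [hget, List.getD_eq_getElem?_getD, List.getElem?_dropLast, if_pos hq]
      rw [hval _ (by omega) (by omega), hval _ hj0 hjn']
      exact h j hj0 (by omega) (by omega)
    · intro j hj0 hjn hpj hi0
      omega

-- ---- root is the minimum ----
theorem root_min_idx (l : List Int) (h : IsHeap l) : ∀ j, j < l.length → hget l 0 ≤ hget l j := by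
  intro j
  induction j using Nat.strong_induction_on with
  | _ j ih =>
    intro hj
    rcases Nat.eq_zero_or_pos j with rfl | hj0
    · exact le_refl _
    · exact le_trans (ih ((j-1)/2) (by omega) (by omega)) (h j hj0 hj (by omega))

theorem root_min (l : List Int) (h : IsHeap l) : ∀ x ∈ l, hget l 0 ≤ x := by
  intro x hx
  obtain ⟨j, hj, rfl⟩ := List.mem_iff_getElem.mp hx
  rw [← hget_eq_getElem l j hj]
  exact root_min_idx l h j hj

-- ---- siftUp / heappush ----
theorem siftUp_mset (l : List Int) (i : Nat) : i < l.length → M (siftUp l i) = M l := by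
  fun_induction siftUp with
  | case1 l i h0 hlt ih =>
    intro hi
    rw [ih (by rw [length_hswap]; omega), hswap_mset l _ i (by omega) (by omega) hi]
  | case2 => intro _; rfl
  | case3 => intro _; rfl

theorem siftUp_heap (l : List Int) (i : Nat) : i < l.length →
    (∀ j, 0 < j → j < l.length → j ≠ i → hget l ((j-1)/2) ≤ hget l j) →
    (∀ j, 0 < j → j < l.length → (j-1)/2 = i → 0 < i → hget l ((i-1)/2) ≤ hget l j) →
    IsHeap (siftUp l i) := by
  fun_induction siftUp with
  | case1 l i h0 hlt ih =>
    intro hi hU1 hU2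
    have hp : (i-1)/2 < i := by omega
    have hpn : (i-1)/2 < l.length := by omega
    have wp : hget (hswap l ((i-1)/2) i) ((i-1)/2) = hget l i :=
      hget_hswap_fst l _ i (by omega) hpn
    have wi : hget (hswap l ((i-1)/2) i) i = hget l ((i-1)/2) :=
      hget_hswap_snd l _ i hi
    have wo : ∀ t, t ≠ (i-1)/2 → t ≠ i → hget (hswap l ((i-1)/2) i) t = hget l t :=
      fun t a b => hget_hswap_other l _ i t a b
    apply ih
    · rw [length_hswap]; omega
    · intro j hj0 hjn hne
      rw [length_hswap] at hjn
      by_cases hji : j = i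
      · subst hji
        rw [wi]
        have : (j-1)/2 = (j-1)/2 := rfl
        rw [wp]
        exact le_of_lt hlt
      · by_cases hpj : (j-1)/2 = i
        · rw [hpj, wi, wo j hne hji]
          exact hU2 j hj0 hjn hpj h0
        · by_cases hpj2 : (j-1)/2 = (i-1)/2
          · rw [hpj2, wp, wo j hne hji]
            have hj' := hU1 j hj0 hjn hji
            rw [hpj2] at hj'
            exact le_trans (le_of_lt hlt) hj' 
          · rw [wo _ hpj2 hpj, wo j hne hji]
            exact hU1 j hj0 hjn hji
    · intro j hj0 hjn hpj hp0
      rw [length_hswap] at hjn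
      have hgo : hget (hswap l ((i-1)/2) i) (((i-1)/2 - 1)/2) = hget l (((i-1)/2 - 1)/2) :=
        wo _ (by omega) (by omega)
      rw [hgo]
      by_cases hji : j = i
      · rw [hji, wi]
        exact hU1 ((i-1)/2) hp0 hpn (by omega)
      · rw [wo j (by omega) hji]
        have hj' := hU1 j hj0 hjn hji
        rw [hpj] at hj'
        exact le_trans (hU1 ((i-1)/2) hp0 hpn (by omega)) hj' 
  | case2 l i h0 hlt =>
    intro hi hU1 hU2
    intro j hj0 hjn hk
    by_cases hji : j = i
    · subst hji
      exact not_lt.mp hlt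
    · exact hU1 j hj0 hjn hji
  | case3 l i h0 =>
    intro hi hU1 hU2
    intro j hj0 hjn hk
    exact hU1 j hj0 hjn (by omega)

theorem push_mset (l : List Int) (x : Int) : M (heappush l x) = x ::ₘ M l := by
  unfold heappush
  rw [siftUp_mset _ _ (by simp)]
  rw [M, M, Multiset.cons_coe, Multiset.coe_eq_coe]
  exact List.perm_append_singleton _ _

theorem hget_append_left (l : List Int) (x : Int) (q : Nat) (hq : q < l.length) :
    hget (l ++ [x]) q = hget l q := by
  simp [hget, List.getD_eq_getElem?_getD, List.getElem?_append_left hq]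

theorem push_heap (l : List Int) (x : Int) (h : IsHeap l) : IsHeap (heappush l x) := by
  unfold heappush
  apply siftUp_heap
  · simp
  · intro j hj0 hjn hne
    simp only [List.length_append, List.length_cons, List.length_nil] at hjn
    have hjl : j < l.length := by omega
    rw [hget_append_left _ _ _ (by omega), hget_append_left _ _ _ hjl]
    exact h j hj0 hjl (by omega)
  · intro j hj0 hjn hpj hi0
    simp only [List.length_append, List.length_cons, List.length_nil] at hjn
    omega

-- ---- the two loops agree on equal multisets ----
theorem pop_root_eq_min (h l : List Int) (m : Int) (hh : h ≠ []) (hheap : IsHeap h)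
    (hM : M h = M l) (hm : PySem.List.min? l (fun x => x) = some m) : hget h 0 = m := by
  have hmem : ∀ y, y ∈ h ↔ y ∈ l := by
    intro y
    rw [← Multiset.mem_coe, ← Multiset.mem_coe, ← M, ← M, hM]
  have h1 : hget h 0 ≤ m :=
    root_min h hheap m ((hmem m).mpr (PySem.List.min?_mem hm))
  have h2 : m ≤ hget h 0 :=
    PySem.List.min?_isMin hm _ ((hmem _).mp (hget_mem h 0 (List.length_pos_of_ne_nil hh)))
  exact le_antisymm h1 h2

theorem loop_eq : ∀ (n : Nat) (h l : List Int) (K a : Int), l.length = n → IsHeap h →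
    M h = M l → loopA h K a = loopB l K a := by
  intro n
  induction n using Nat.strong_induction_on with
  | _ n ih =>
  intro h l K a hlen hheap hM
  by_cases hnil : l = []
  · subst hnil
    have hh : h = [] := (Multiset.coe_eq_zero h).mp (by rw [← M, hM]; rfl)
    subst hh
    rw [loopA, loopB]
    simp
  · have hh : h ≠ [] := by
      intro e; subst e
      exact hnil ((Multiset.coe_eq_zero l).mp (by rw [← M, ← hM]; rfl))
    have hm := popMin_min l hnil
    have hmf : hget h 0 = (popMin l).1 := pop_root_eq_min h l _ hh hheap hM hm
    have hml : (popMin l).1 ∈ l := PySem.List.min?_mem hm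
    have hMl : M l = (popMin l).1 ::ₘ M (popMin l).2 := by
      rw [popMin_snd l hnil, M, M, Multiset.cons_coe, Multiset.coe_eq_coe]
      exact List.perm_cons_erase hml
    have hMr : M (heappop h).2 = M (popMin l).2 := by
      have := pop_mset h hh
      rw [hmf] at this
      exact (Multiset.cons_inj_right _).mp (this.symm.trans (hM.trans hMl))
    have hcard : ∀ (u v : List Int), M u = M v → u.length = v.length := by
      intro u v huv
      have := congrArg Multiset.card huv
      simpa [M] using this
    rw [loopA, loopB]
    simp only [hh, hnil, dite_false, pop_fst, hmf]
    by_cases hK : K ≤ (popMin l).1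
    · simp only [if_pos hK]
    · simp only [if_neg hK]
      have hlen2 : (heappop h).2.length = (popMin l).2.length := hcard _ _ hMr
      by_cases hemp : (popMin l).2 = []
      · have h0 : (heappop h).2.length = 0 := by rw [hlen2, hemp]; rfl
        simp [h0, hemp]
      · have hlenpos : ¬ (heappop h).2.length = 0 := by
          rw [hlen2]
          exact fun e => hemp (List.length_eq_zero_iff.mp e)
        simp only [dif_neg hlenpos, dif_neg hemp]
        have hh2 : (heappop h).2 ≠ [] := fun e => hlenpos (by rw [e]; rfl)
        have hheap2 : IsHeap (heappop h).2 := pop_heap h hheap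
        have hm2 := popMin_min (popMin l).2 hemp
        have hms : hget (heappop h).2 0 = (popMin (popMin l).2).1 :=
          pop_root_eq_min _ _ _ hh2 hheap2 hMr hm2
        have hml2 : (popMin (popMin l).2).1 ∈ (popMin l).2 := PySem.List.min?_mem hm2
        have hMl2 : M (popMin l).2 = (popMin (popMin l).2).1 ::ₘ M (popMin (popMin l).2).2 := by
          rw [popMin_snd _ hemp, M, M, Multiset.cons_coe, Multiset.coe_eq_coe]
          exact List.perm_cons_erase hml2
        have hMr2 : M (heappop (heappop h).2).2 = M (popMin (popMin l).2).2 := by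
          have := pop_mset (heappop h).2 hh2
          rw [hms] at this
          exact (Multiset.cons_inj_right _).mp (this.symm.trans (hMr.trans hMl2))
        rw [hms]
        apply ih ((popMin (popMin l).2).2 ++ [(popMin l).1 + 2 * (popMin (popMin l).2).1]).length
          _ _ _ _ _ rfl
        · exact push_heap _ _ (pop_heap _ hheap2)
        · rw [push_mset, hMr2, M, M, Multiset.cons_coe, Multiset.coe_eq_coe]
          exact (List.perm_append_singleton _ _).symm
        · -- the new list is strictly shorter than l
-- the new list is strictly shorter than l
          have e1 := popMin_len l hnil
          have e2 := popMin_len (popMin l).2 hemp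
          have e3 : 0 < l.length := List.length_pos_of_ne_nil hnil
          simp only [List.length_append, List.length_cons, List.length_nil]
          omega

theorem solution_eq (scoville : List Int) (K : Int) (h : scoville ≠ []) :
    solution scoville K = solution_alt scoville K := by
  unfold solution solution_alt
  exact loop_eq scoville.length (heapify scoville) scoville K 0 rfl (heapify_heap _) (heapify_mset _)

-- ===== VERDICT =====
theorem solution_spec : Claim_equal_solution := by
  intro scoville K _ hpre
  unfold Spec_solution
  exact solution_eq scoville K hpre
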